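-- pv_equiv track=rewrite | github.com/Ohaginia/ClothRepairing | mainwindow/src/detecting_util.py | merge_overlapping_groups
-- ===== SOURCE A (Python) =====
-- def merge_overlapping_groups(edge_group):
--     merged_groups = []
--     for group in edge_group:
--         found_overlap = False
--         for merged_group in merged_groups:
--             if set(group) & set(merged_group):
--                 merged_group.extend(x for x in group if x not in merged_group)
--                 found_overlap = True
--                 break
--         if not found_overlap:
--             merged_groups.append(group)
--     return merged_groups
-- ===== SOURCE B (Python) =====
-- def merge_overlapping_groups(edge_group):
--     groups = []      # merged groups, in creation order
--     elem_sets = []   # elem_sets[i] == set(groups[i])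
--     first = {}       # element -> index of FIRST merged group containing it
--     for group in edge_group:
--         j = None
--         for e in group:
--             k = first.get(e)
--             if k is not None and (j is None or k < j):
--                 j = k
--         if j is None:
--             j = len(groups)
--             groups.append(list(group))
--             elem_sets.append(set(group))
--             for e in group:
--                 if e not in first:
--                     first[e] = j
--         else:
--             g = groups[j]
--             s = elem_sets[j]
--             for x in group:
--                 if x not in s:
--                     g.append(x)
--                     s.add(x)
--                     k = first.get(x)
--                     if k is None or k > j:
--                         first[x] = j
--     return groups
-- ===== Notes on version B (the rewrite author's own statement) =====
-- stated objective: faster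
-- what changed: Replaces A's scan over all previously merged groups per input group by an element-to-first-group-index dictionary plus per-group element sets: the first overlapping merged group is the minimum dict index over the group's elements, found without touching the other groups.
import Mathlib
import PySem

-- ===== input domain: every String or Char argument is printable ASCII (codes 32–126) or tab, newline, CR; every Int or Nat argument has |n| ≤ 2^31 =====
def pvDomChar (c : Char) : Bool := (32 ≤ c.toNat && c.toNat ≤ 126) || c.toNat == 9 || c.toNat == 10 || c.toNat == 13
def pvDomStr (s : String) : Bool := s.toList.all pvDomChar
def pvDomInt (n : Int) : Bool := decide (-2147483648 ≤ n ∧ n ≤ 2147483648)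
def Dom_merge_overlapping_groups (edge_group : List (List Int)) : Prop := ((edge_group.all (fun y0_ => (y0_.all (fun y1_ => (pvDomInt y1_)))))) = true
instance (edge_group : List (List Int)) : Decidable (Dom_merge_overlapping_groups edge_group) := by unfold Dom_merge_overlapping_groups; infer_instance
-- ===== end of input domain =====

-- B replaces A's scan over all merged groups by an element→first-group-index dictionary (asymptotically faster);
-- equivalence is about the RETURN value only: Python A mutates the caller's inner lists in place, B does not.

-- ===== PORT A =====
-- merged_group.extend(x for x in group if x not in merged_group)  (live membership while extending)
def pvExtendA (mg g : List Int) : List Int :=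
  g.foldl (fun acc x => if x ∈ acc then acc else acc ++ [x]) mg

-- the inner 'for merged_group in merged_groups: … break' loop; Bool = found_overlap
-- 'set(group) & set(merged_group)' is truthy iff some element of group is in merged_group
def pvMergeIntoA (g : List Int) : List (List Int) → List (List Int) × Bool
  | [] => ([], false)
  | mg :: rest =>
    if g.any (fun x => decide (x ∈ mg)) then (pvExtendA mg g :: rest, true)
    else
      let p := pvMergeIntoA g rest
      (mg :: p.1, p.2)

def merge_overlapping_groups (edge_group : List (List Int)) : List (List Int) :=
  edge_group.foldl (fun ms g =>
    let p := pvMergeIntoA g ms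
    if p.2 then p.1 else ms ++ [g]) []

-- ===== PORT B =====
-- j = None; for e in group: k = first.get(e); if k is not None and (j is None or k < j): j = k
def pvMinIdxB (first : PySem.Dict Int Int) (g : List Int) : Option Int :=
  g.foldl (fun j e =>
    match first.get? e with
    | none => j
    | some k =>
      match j with
      | none => some k
      | some j0 => if k < j0 then some k else some j0) none

-- body of the inner 'for x in group' loop of B's overlap branch (appends new elements,
-- keeps the element set and the first-index dict in step)
def pvAbsorbB (j : Int) (t : List Int × PySem.Set Int × PySem.Dict Int Int) (x : Int) :
    List Int × PySem.Set Int × PySem.Dict Int Int :=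
  if PySem.Set.contains t.2.1 x then t
  else (t.1 ++ [x], PySem.Set.add t.2.1 x,
        match t.2.2.get? x with
        | some k => if j < k then t.2.2.insert x j else t.2.2
        | none => t.2.2.insert x j)

-- one iteration of B's main loop; state = (groups, elem_sets, first)
def pvStepB (st : List (List Int) × List (PySem.Set Int) × PySem.Dict Int Int)
    (group : List Int) : List (List Int) × List (PySem.Set Int) × PySem.Dict Int Int :=
  match pvMinIdxB st.2.2 group with
  | none =>
    let j : Int := st.1.length
    (st.1 ++ [group], st.2.1 ++ [PySem.Set.ofList group],
     group.foldl (fun d e => if (d.get? e).isSome then d else d.insert e j) st.2.2)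
  | some j =>
    match PySem.List.pyGet? st.1 j, PySem.List.pyGet? st.2.1 j with
    | some g0, some s0 =>
      let r := group.foldl (pvAbsorbB j) (g0, s0, st.2.2)
      (st.1.set j.toNat r.1, st.2.1.set j.toNat r.2.1, r.2.2)
    | _, _ => st  -- unreachable totality guard: j is always a valid index

def merge_overlapping_groups_alt (edge_group : List (List Int)) : List (List Int) :=
  (edge_group.foldl pvStepB ([], [], PySem.Dict.empty)).1

-- ===== PRECONDITION & SPEC =====
def Spec_merge_overlapping_groups (edge_group : List (List Int)) (out : List (List Int)) : Prop := out = merge_overlapping_groups_alt edge_group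
instance (edge_group : List (List Int)) (out : List (List Int)) : Decidable (Spec_merge_overlapping_groups edge_group out) := by unfold Spec_merge_overlapping_groups; infer_instance

-- ===== CLAIM (what is proved, stated in full; the proofs are below) =====
def Claim_equal_merge_overlapping_groups : Prop := ∀ (edge_group : List (List Int)), Dom_merge_overlapping_groups edge_group → Spec_merge_overlapping_groups edge_group (merge_overlapping_groups edge_group)

-- ===== LEMMAS AND PROOFS =====

-- index of the first group of ms meeting g (proof-side characterisation of both programs)
def pvFidx (g : List Int) : List (List Int) → Option Nat
  | [] => none
  | mg :: rest =>
    if g.any (fun x => decide (x ∈ mg)) then some 0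
    else (pvFidx g rest).map (· + 1)

-- min on Option Nat, none = +∞
def pvOmin : Option Nat → Option Nat → Option Nat
  | none, b => b
  | some a, none => some a
  | some a, some b => some (min a b)

theorem pvOmin_none_right (a : Option Nat) : pvOmin a none = a := by
  cases a <;> rfl

theorem pvOmin_assoc (a b c : Option Nat) : pvOmin (pvOmin a b) c = pvOmin a (pvOmin b c) := by
  cases a <;> cases b <;> cases c <;> simp [pvOmin, Nat.min_assoc]

theorem pvOmin_map_succ (a b : Option Nat) :
    pvOmin (a.map (· + 1)) (b.map (· + 1)) = (pvOmin a b).map (· + 1) := by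
  cases a <;> cases b <;> simp [pvOmin, Nat.min_def] <;> split_ifs <;> omega

theorem pvOmin_zero_left (b : Option Nat) : pvOmin (some 0) b = some 0 := by
  cases b <;> rfl

theorem pvOmin_zero_right (a : Option Nat) : pvOmin a (some 0) = some 0 := by
  cases a <;> simp [pvOmin]

theorem pvFidx_nil (ms : List (List Int)) : pvFidx [] ms = none := by
  induction ms with
  | nil => rfl
  | cons mg rest ih => simp [pvFidx, ih]

theorem pvFidx_cons (e : Int) (g : List Int) (ms : List (List Int)) :
    pvFidx (e :: g) ms = pvOmin (pvFidx [e] ms) (pvFidx g ms) := by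
  induction ms with
  | nil => rfl
  | cons mg rest ih =>
    simp only [pvFidx, List.any_cons, List.any_nil, Bool.or_false]
    by_cases he : e ∈ mg <;> by_cases hg : g.any (fun x => decide (x ∈ mg)) = true
    · simp [he, hg, pvOmin]
    · simp [he, hg, pvOmin_zero_left]
    · simp [he, hg, pvOmin_zero_right]
    · simp [he, hg, ih, pvOmin_map_succ]

theorem pvFidx_some_lt {g : List Int} {ms : List (List Int)} {i : Nat}
    (h : pvFidx g ms = some i) : i < ms.length := by
  induction ms generalizing i with
  | nil => simp [pvFidx] at h
  | cons mg rest ih =>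
    simp only [pvFidx] at h
    split at h
    · simp only [Option.some.injEq] at h
      simp only [List.length_cons]
      omega
    · rcases Option.map_eq_some_iff.mp h with ⟨j, hj, rfl⟩
      simpa using Nat.succ_lt_succ (ih hj)

-- the A-side scan, characterised by pvFidx
theorem pvMergeIntoA_eq (g : List Int) (ms : List (List Int)) :
    pvMergeIntoA g ms =
      match pvFidx g ms with
      | none => (ms, false)
      | some i => (ms.set i (pvExtendA (ms.getD i []) g), true) := by
  induction ms with
  | nil => rfl
  | cons mg rest ih =>
    simp only [pvMergeIntoA, pvFidx]
    split
    · rfl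
    · rw [ih]
      cases h : pvFidx g rest <;> simp

-- the B-side accumulator fold for the running minimum
theorem pvFoldOmin_acc (F : Int → Option Nat) (g : List Int) (a : Option Nat) :
    g.foldl (fun acc e => pvOmin acc (F e)) a =
      pvOmin a (g.foldl (fun acc e => pvOmin acc (F e)) none) := by
  induction g generalizing a with
  | nil => simp [List.foldl, pvOmin_none_right]
  | cons e g ih =>
    simp only [List.foldl]
    rw [ih, ih (pvOmin none (F e))]
    exact pvOmin_assoc a (F e) _

theorem pvFoldOmin_eq_fidx (g : List Int) (ms : List (List Int)) :
    g.foldl (fun acc e => pvOmin acc (pvFidx [e] ms)) none = pvFidx g ms := by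
  induction g with
  | nil => simp [List.foldl, pvFidx_nil]
  | cons e g ih =>
    simp only [List.foldl]
    rw [pvFoldOmin_acc, ih, pvFidx_cons e g ms]
    rfl

-- dictionary invariant: first.get(e) is the index of the first group of ms containing e
def pvDinv (ms : List (List Int)) (d : PySem.Dict Int Int) : Prop :=
  ∀ e : Int, d.get? e = (pvFidx [e] ms).map Int.ofNat

theorem pvMinIdxB_eq {ms : List (List Int)} {d : PySem.Dict Int Int}
    (hd : pvDinv ms d) (g : List Int) :
    pvMinIdxB d g = (pvFidx g ms).map Int.ofNat := by
  have aux : ∀ (g : List Int) (a : Option Nat),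
      g.foldl (fun j e =>
        match d.get? e with
        | none => j
        | some k =>
          match j with
          | none => some k
          | some j0 => if k < j0 then some k else some j0) (a.map Int.ofNat)
      = (g.foldl (fun acc e => pvOmin acc (pvFidx [e] ms)) a).map Int.ofNat := by
    intro g
    induction g with
    | nil => intro a; rfl
    | cons e g ih =>
      intro a
      simp only [List.foldl_cons, hd e]
      cases hF : pvFidx [e] ms with
      | none =>
        simp only [Option.map_none, pvOmin_none_right]
        exact ih a
      | some k =>
        cases a with
        | none =>
          simp only [Option.map_none, Option.map_some]
          exact ih (some k)
        | some j0 =>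
          simp only [Option.map_some, pvOmin, Int.ofNat_eq_natCast]
          by_cases hk : k < j0
          · rw [if_pos (show (k : Int) < (j0 : Int) by exact_mod_cast hk)]
            have hm : min j0 k = k := by omega
            rw [hm]
            simpa [Int.ofNat_eq_natCast] using ih (some k)
          · rw [if_neg (show ¬ (k : Int) < (j0 : Int) by exact_mod_cast hk)]
            have hm : min j0 k = j0 := by omega
            rw [hm]
            simpa [Int.ofNat_eq_natCast] using ih (some j0)
  have h0 := aux g none
  rw [pvFoldOmin_eq_fidx] at h0
  exact h0

-- the no-overlap dictionary fold
theorem pvFoldInsertAbsent (g : List Int) (v : Int) (d : PySem.Dict Int Int) (e : Int) :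
    (g.foldl (fun d x => if (d.get? x).isSome then d else d.insert x v) d).get? e =
      if (d.get? e).isSome then d.get? e else if e ∈ g then some v else none := by
  induction g generalizing d with
  | nil =>
    cases h : d.get? e <;> simp [h]
  | cons x g ih =>
    simp only [List.foldl_cons]
    cases hx : d.get? x with
    | some w =>
      rw [if_pos (by simp [hx])]
      rw [ih d]
      by_cases he : e = x
      · subst he; simp [hx]
      · simp [List.mem_cons, he]
    | none =>
      rw [if_neg (by simp [hx])]
      rw [ih (d.insert x v)]
      by_cases he : e = x
      · subst he
        simp [PySem.Dict.get?_insert_self, hx, List.mem_cons]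
      · rw [PySem.Dict.get?_insert_of_ne d v he]
        simp [List.mem_cons, he]

theorem pvFidx_append_singleton (e : Int) (ms : List (List Int)) (gp : List Int) :
    pvFidx [e] (ms ++ [gp]) =
      match pvFidx [e] ms with
      | some k => some k
      | none => if e ∈ gp then some ms.length else none := by
  induction ms with
  | nil =>
    by_cases he : e ∈ gp <;> simp [pvFidx, he]
  | cons mg rest ih =>
    simp only [List.cons_append, pvFidx, List.any_cons, List.any_nil, Bool.or_false]
    by_cases hm : e ∈ mg
    · simp [hm]
    · simp only [hm, decide_false, Bool.false_eq_true, if_false, ih]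
      cases h : pvFidx [e] rest with
      | some k => simp
      | none =>
        by_cases he : e ∈ gp <;> simp [he, List.length_cons]

theorem pvFidx_set_congr_ne {e x : Int} (hne : e ≠ x) (ms : List (List Int)) (n : Nat) (h : List Int) :
    pvFidx [e] (ms.set n (h ++ [x])) = pvFidx [e] (ms.set n h) := by
  induction ms generalizing n with
  | nil => rfl
  | cons mg rest ih =>
    cases n with
    | zero =>
      simp only [List.set_cons_zero, pvFidx, List.any_cons, List.any_nil, Bool.or_false]
      have : decide (e ∈ h ++ [x]) = decide (e ∈ h) := by
        simp [hne]
      rw [this]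
    | succ n =>
      simp only [List.set_cons_succ, pvFidx, List.any_cons, List.any_nil, Bool.or_false]
      rw [ih]

theorem pvFidx_set_append_self (x : Int) (ms : List (List Int)) {n : Nat} (hn : n < ms.length) :
    pvFidx [x] (ms.set n (ms.getD n [] ++ [x])) = pvOmin (pvFidx [x] ms) (some n) := by
  induction ms generalizing n with
  | nil => simp at hn
  | cons mg rest ih =>
    cases n with
    | zero =>
      simp only [List.getD_cons_zero, List.set_cons_zero, pvFidx, List.any_cons,
        List.any_nil, Bool.or_false]
      rw [if_pos (by simp), pvOmin_zero_right]
    | succ n =>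
      simp only [List.getD_cons_succ, List.set_cons_succ, pvFidx, List.any_cons,
        List.any_nil, Bool.or_false]
      by_cases hm : x ∈ mg
      · simp [hm, pvOmin]
      · simp only [hm, decide_false, Bool.false_eq_true, if_false]
        rw [ih (Nat.lt_of_succ_lt_succ (by simpa using hn))]
        rw [show (some (n + 1) : Option Nat) = (some n).map (· + 1) from rfl,
          ← pvOmin_map_succ]

-- combined invariant of B's state against A's merged_groups list
def pvInv (ms : List (List Int)) (st : List (List Int) × List (PySem.Set Int) × PySem.Dict Int Int) : Prop :=
  st.1 = ms ∧ st.2.1 = ms.map PySem.Set.ofList ∧ pvDinv ms st.2.2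

-- the overlap-branch fold of B, related to pvExtendA, with the dict invariant threaded through
theorem pvExtendFold (jn : Nat) (ms : List (List Int)) (hn : jn < ms.length) (g : List Int) :
    ∀ (g1 : List Int) (d : PySem.Dict Int Int),
      pvDinv (ms.set jn g1) d →
      (g.foldl (pvAbsorbB (jn : Int)) (g1, PySem.Set.ofList g1, d)).1 = pvExtendA g1 g ∧
      (g.foldl (pvAbsorbB (jn : Int)) (g1, PySem.Set.ofList g1, d)).2.1 =
        PySem.Set.ofList (pvExtendA g1 g) ∧
      pvDinv (ms.set jn (pvExtendA g1 g))
        (g.foldl (pvAbsorbB (jn : Int)) (g1, PySem.Set.ofList g1, d)).2.2 := by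
  induction g with
  | nil =>
    intro g1 d hd
    exact ⟨rfl, rfl, hd⟩
  | cons x g ih =>
    intro g1 d hd
    simp only [List.foldl_cons, pvAbsorbB]
    by_cases hx : x ∈ g1
    · have hc : (PySem.Set.ofList g1).contains x = true := by
        rw [PySem.Set.contains_iff, PySem.Set.mem_ofList]
        exact hx
      rw [if_pos hc]
      have hE : pvExtendA g1 (x :: g) = pvExtendA g1 g := by
        simp [pvExtendA, hx]
      rw [hE]
      exact ih g1 d hd
    · have hc : ¬ ((PySem.Set.ofList g1).contains x = true) := by
        rw [PySem.Set.contains_iff, PySem.Set.mem_ofList]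
        exact hx
      rw [if_neg hc]
      have hE : pvExtendA g1 (x :: g) = pvExtendA (g1 ++ [x]) g := by
        simp [pvExtendA, hx]
      -- the new dict after absorbing x
      have hlen : jn < (ms.set jn g1).length := by simpa using hn
      have hgd : (ms.set jn g1).getD jn [] = g1 := by
        rw [List.getD_eq_getElem _ _ hlen]
        simp
      have hset2 : ∀ h' : List Int, (ms.set jn g1).set jn h' = ms.set jn h' :=
        fun h' => by rw [List.set_set]
      have hd' : pvDinv (ms.set jn (g1 ++ [x]))
          (match d.get? x with
            | some k => if (jn : Int) < k then d.insert x (jn : Int) else d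
            | none => d.insert x (jn : Int)) := by
        intro e
        by_cases he : e = x
        · subst he
          have hfx : pvFidx [e] (ms.set jn (g1 ++ [e])) =
              pvOmin (pvFidx [e] (ms.set jn g1)) (some jn) := by
            have h0 := pvFidx_set_append_self e (ms.set jn g1) hlen
            rw [hgd, hset2 (g1 ++ [e])] at h0
            exact h0
          rw [hfx, hd e]
          cases hf : pvFidx [e] (ms.set jn g1) with
          | none =>
            simp only [Option.map_none, PySem.Dict.get?_insert_self]
            rfl
          | some k =>
            simp only [Option.map_some]
            by_cases hk : jn < k
            · rw [if_pos (show (jn : Int) < Int.ofNat k by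
                  simp only [Int.ofNat_eq_natCast]; exact_mod_cast hk),
                PySem.Dict.get?_insert_self]
              have hmin : min k jn = jn := by omega
              simp only [pvOmin, hmin, Option.map_some, Int.ofNat_eq_natCast]
            · rw [if_neg (show ¬ (jn : Int) < Int.ofNat k by
                  simp only [Int.ofNat_eq_natCast]; exact_mod_cast hk), hd e, hf]
              have hmin : min k jn = k := by omega
              simp only [pvOmin, hmin]
        · have hfx : pvFidx [e] (ms.set jn (g1 ++ [x])) = pvFidx [e] (ms.set jn g1) := by
            rw [← hset2 (g1 ++ [x]), pvFidx_set_congr_ne he, hset2]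
          rw [hfx]
          cases d.get? x with
          | none =>
            show (d.insert x (jn : Int)).get? e = Option.map Int.ofNat (pvFidx [e] (ms.set jn g1))
            rw [PySem.Dict.get?_insert_of_ne d _ he, hd e]
          | some k =>
            show (if (jn : Int) < k then d.insert x (jn : Int) else d).get? e =
              Option.map Int.ofNat (pvFidx [e] (ms.set jn g1))
            by_cases hk : (jn : Int) < k
            · rw [if_pos hk, PySem.Dict.get?_insert_of_ne d _ he, hd e]
            · rw [if_neg hk, hd e]
      have := ih (g1 ++ [x])
        (match d.get? x with
          | some k => if (jn : Int) < k then d.insert x (jn : Int) else d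
          | none => d.insert x (jn : Int)) hd'
      rw [hE, PySem.Set.ofList_append_singleton] at *
      exact this

theorem pvStep_inv {ms : List (List Int)} {st} (h : pvInv ms st) (g : List Int) :
    pvInv (let p := pvMergeIntoA g ms; if p.2 then p.1 else ms ++ [g]) (pvStepB st g) := by
  obtain ⟨gs, ss, d⟩ := st
  obtain ⟨h1, h2, h3⟩ := h
  simp only at h1 h2 h3
  subst h1
  subst h2
  unfold pvStepB
  simp only
  rw [pvMinIdxB_eq h3 g]
  rw [pvMergeIntoA_eq g gs]
  cases hF : pvFidx g gs with
  | none =>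
    simp only [Option.map_none, Bool.false_eq_true, if_false]
    refine ⟨rfl, by simp, ?_⟩
    intro e
    simp only
    rw [pvFoldInsertAbsent, pvFidx_append_singleton]
    cases h' : pvFidx [e] gs with
    | some k => simp [h3 e, h']
    | none =>
      by_cases he : e ∈ g <;> simp [h3 e, h', he, Int.ofNat_eq_natCast]
  | some jn =>
    have hn : jn < gs.length := pvFidx_some_lt hF
    simp only [Option.map_some, Int.ofNat_eq_natCast, if_true]
    rw [PySem.List.pyGet?_natCast gs jn, PySem.List.pyGet?_natCast (gs.map PySem.Set.ofList) jn,
      List.getElem?_eq_getElem hn, List.getElem?_map, List.getElem?_eq_getElem hn]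
    simp only [Option.map_some, Int.toNat_natCast]
    have hd0 : pvDinv (gs.set jn gs[jn]) d := by
      rw [List.set_getElem_self]
      exact h3
    obtain ⟨hr1, hr2, hr3⟩ := pvExtendFold jn gs hn g gs[jn] d hd0
    have hgd : gs.getD jn [] = gs[jn] := List.getD_eq_getElem gs [] hn
    refine ⟨?_, ?_, ?_⟩
    · simp only [hr1, hgd]
    · simp only [hr2, hgd, List.map_set]
    · simp only [hgd]
      exact hr3

theorem pvMain (edge_group : List (List Int)) :
    pvInv (merge_overlapping_groups edge_group)
      (edge_group.foldl pvStepB ([], [], PySem.Dict.empty)) := by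
  unfold merge_overlapping_groups
  have main : ∀ (l ms : List (List Int)) st, pvInv ms st →
      pvInv (l.foldl (fun ms g => let p := pvMergeIntoA g ms; if p.2 then p.1 else ms ++ [g]) ms)
        (l.foldl pvStepB st) := by
    intro l
    induction l with
    | nil => intro ms st h; exact h
    | cons g l ih =>
      intro ms st h
      exact ih _ _ (pvStep_inv h g)
  exact main edge_group [] ([], [], PySem.Dict.empty)
    ⟨rfl, rfl, fun e => by simp [PySem.Dict.get?_empty, pvFidx]⟩

-- ===== VERDICT (by name: the statement is the Claim_ definition above) =====
theorem merge_overlapping_groups_spec : Claim_equal_merge_overlapping_groups := by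
  intro edge_group _
  unfold Spec_merge_overlapping_groups merge_overlapping_groups_alt
  exact ((pvMain edge_group).1).symm
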